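-- pv_equiv track=rewrite | github.com/Grottersha123/Python_muddle | letter_queue.py | letter_queue
-- ===== SOURCE A (Python) =====
-- def letter_queue(data):
-- 	queue= []
-- 	message = ''
-- 	for i in data:
-- 		if "PUSH"in i:
-- 			a  = i.split()[1]
-- 			queue.append(a)
-- 		if "POP" == i:
-- 			if len(queue) != 0:
-- 				queue.pop(0)
--
-- 	return ''.join(queue)
-- ===== SOURCE B (Python) =====
-- def letter_queue(data):
--     npush = 0
--     removed = 0
--     for cmd in data:
--         if "PUSH" in cmd:
--             npush += 1
--         if cmd == "POP" and removed < npush: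
--             removed += 1
--     tokens = [cmd.split()[1] for cmd in data if "PUSH" in cmd]
--     return ''.join(tokens[removed:])
-- ===== Notes on version B (the rewrite author's own statement) =====
-- stated objective: alternative
-- what changed: Replaces the mutated queue (append/pop(0)) with a pure counting pass over the commands (npush/removed integers only), then collects all pushed tokens in one comprehension and joins the slice tokens[removed:].
-- outside the precondition, e.g. on letter_queue(['PUSH']): A raises IndexError, B raises IndexError
import Mathlib
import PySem

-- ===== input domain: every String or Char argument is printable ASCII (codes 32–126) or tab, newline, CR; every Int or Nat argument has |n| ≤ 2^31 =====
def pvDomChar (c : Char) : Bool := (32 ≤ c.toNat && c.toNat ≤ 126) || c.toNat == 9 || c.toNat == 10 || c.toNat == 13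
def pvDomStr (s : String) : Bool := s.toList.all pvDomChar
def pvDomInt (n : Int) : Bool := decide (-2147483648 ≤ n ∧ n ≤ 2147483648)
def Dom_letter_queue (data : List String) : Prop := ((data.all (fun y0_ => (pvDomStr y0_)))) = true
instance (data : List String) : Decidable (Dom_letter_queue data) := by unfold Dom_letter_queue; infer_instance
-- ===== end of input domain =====

-- B replaces A's mutated queue (append / pop(0)) with a pure counting pass plus one
-- comprehension over the push tokens, joining a slice at the end (alternative decomposition).


-- ===== PORT A =====
-- i.split()[1]; pyGet? is none exactly when Python raises IndexError (excluded by Pre_);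
-- the .getD "" totalization is never reached inside Pre_.
def pvTok (i : String) : String := (PySem.List.pyGet? (PySem.Str.split₀ i) 1).getD ""

-- one loop body of A: append on "PUSH" in i, then pop(0) on i == "POP" if non-empty
def pvAStep (queue : List String) (i : String) : List String :=
  let queue := if PySem.Str.isIn "PUSH" i then queue ++ [pvTok i] else queue
  if i = "POP" then (if queue.length ≠ 0 then queue.drop 1 else queue) else queue

def letter_queue (data : List String) : String :=
  PySem.Str.join "" (data.foldl pvAStep [])

-- ===== PORT B =====
-- one loop body of B's counting pass over (npush, removed)
def pvBStep (s : Nat × Nat) (i : String) : Nat × Nat :=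
  let np := if PySem.Str.isIn "PUSH" i then s.1 + 1 else s.1
  if i = "POP" ∧ s.2 < np then (np, s.2 + 1) else (np, s.2)

def letter_queue_alt (data : List String) : String :=
  let s := data.foldl pvBStep (0, 0)
  let tokens := (data.filter (fun i => PySem.Str.isIn "PUSH" i)).map pvTok
  PySem.Str.join "" (tokens.drop s.2)

-- ===== PRECONDITION & SPEC =====
-- Pre_ excludes exactly the inputs where Python A (and B) raise IndexError:
-- a command containing "PUSH" whose whitespace split has fewer than 2 tokens.
def Pre_letter_queue (data : List String) : Prop :=
  ∀ i ∈ data, PySem.Str.isIn "PUSH" i = true → 2 ≤ (PySem.Str.split₀ i).length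
instance (data : List String) : Decidable (Pre_letter_queue data) := by
  unfold Pre_letter_queue; infer_instance
def pvWitness_letter_queue : List String := ["PUSH a", "PUSH b", "POP", "POP", "PUSH c", "POP", "PUSH d"]

def Spec_letter_queue (data : List String) (out : String) : Prop := out = letter_queue_alt data
instance (data : List String) (out : String) : Decidable (Spec_letter_queue data out) := by unfold Spec_letter_queue; infer_instance

-- ===== CLAIM (what is proved, stated in full; the proofs are below) =====
def Claim_equal_letter_queue : Prop := ∀ (data : List String), Dom_letter_queue data → Pre_letter_queue data → Spec_letter_queue data (letter_queue data)

-- ===== LEMMAS AND PROOFS =====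
theorem pv_pop_not_push : PySem.Str.isIn "PUSH" "POP" = false := by decide

theorem pv_aStep_pop (q : List String) :
    pvAStep q "POP" = if q.length ≠ 0 then q.drop 1 else q := by
  unfold pvAStep; rw [pv_pop_not_push]; simp

theorem pv_bStep_pop (np rm : Nat) :
    pvBStep (np, rm) "POP" = if rm < np then (np, rm + 1) else (np, rm) := by
  unfold pvBStep; rw [pv_pop_not_push]; simp

theorem pv_aStep_push (q : List String) (i : String)
    (hP : PySem.Str.isIn "PUSH" i = true) (hPop : i ≠ "POP") :
    pvAStep q i = q ++ [pvTok i] := by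
  unfold pvAStep; rw [hP]; simp [hPop]

theorem pv_bStep_push (np rm : Nat) (i : String)
    (hP : PySem.Str.isIn "PUSH" i = true) (hPop : i ≠ "POP") :
    pvBStep (np, rm) i = (np + 1, rm) := by
  unfold pvBStep; rw [hP]; simp [hPop]

theorem pv_aStep_other (q : List String) (i : String)
    (hP : PySem.Str.isIn "PUSH" i = false) (hPop : i ≠ "POP") :
    pvAStep q i = q := by
  unfold pvAStep; rw [hP]; simp [hPop]

theorem pv_bStep_other (np rm : Nat) (i : String)
    (hP : PySem.Str.isIn "PUSH" i = false) (hPop : i ≠ "POP") :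
    pvBStep (np, rm) i = (np, rm) := by
  unfold pvBStep; rw [hP]; simp [hPop]

theorem pv_step_le (s : Nat × Nat) (i : String) : s.2 ≤ (pvBStep s i).2 := by
  unfold pvBStep; dsimp only; split <;> split <;> simp

theorem pv_rm_le (l : List String) : ∀ (s : Nat × Nat), s.2 ≤ (l.foldl pvBStep s).2 := by
  induction l with
  | nil => intro s; simp
  | cons i t ih =>
    intro s
    simp only [List.foldl_cons]
    exact le_trans (pv_step_le s i) (ih (pvBStep s i))

theorem pv_key (l : List String) : ∀ (q : List String) (np rm : Nat), np = rm + q.length →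
    l.foldl pvAStep q
      = (q ++ (l.filter (fun i => PySem.Str.isIn "PUSH" i)).map pvTok).drop
          ((l.foldl pvBStep (np, rm)).2 - rm) := by
  induction l with
  | nil => intro q np rm _; simp
  | cons i t ih =>
    intro q np rm hnp
    by_cases hPop : i = "POP"
    · subst hPop
      rw [List.foldl_cons, List.foldl_cons, pv_aStep_pop, pv_bStep_pop,
        List.filter_cons_of_neg (by decide)]
      cases q with
      | nil =>
        have hnp' : np = rm := by simpa using hnp
        rw [if_neg (by simp), if_neg (by omega : ¬ rm < np)]
        exact ih [] np rm hnp
      | cons x q' =>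
        rw [if_pos (by simp), if_pos (by simp [hnp, List.length_cons] : rm < np),
          List.drop_one, List.tail_cons]
        rw [ih q' np (rm + 1) (by rw [hnp, List.length_cons]; omega)]
        have hle : rm + 1 ≤ (t.foldl pvBStep (np, rm + 1)).2 := pv_rm_le t (np, rm + 1)
        have harith : (t.foldl pvBStep (np, rm + 1)).2 - rm
            = ((t.foldl pvBStep (np, rm + 1)).2 - (rm + 1)) + 1 := by omega
        rw [harith, List.cons_append, List.drop_succ_cons]
    · by_cases hP : PySem.Str.isIn "PUSH" i = true
      · rw [List.foldl_cons, List.foldl_cons, pv_aStep_push q i hP hPop,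
          pv_bStep_push np rm i hP hPop, List.filter_cons_of_pos (by simpa using hP),
          List.map_cons]
        rw [ih (q ++ [pvTok i]) (np + 1) rm (by rw [hnp, List.length_append]; simp; omega)]
        simp [List.append_assoc]
      · have hP' : PySem.Str.isIn "PUSH" i = false := by
          cases h : PySem.Str.isIn "PUSH" i <;> simp_all
        rw [List.foldl_cons, List.foldl_cons, pv_aStep_other q i hP' hPop,
          pv_bStep_other np rm i hP' hPop,
          List.filter_cons_of_neg (by simpa using hP')]
        exact ih q np rm hnp

-- ===== VERDICT (by name: the statement is the Claim_ definition above) =====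
theorem letter_queue_spec : Claim_equal_letter_queue := by
  intro data _ _
  unfold Spec_letter_queue letter_queue letter_queue_alt
  rw [pv_key data [] 0 0 (by simp)]
  simp
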